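-- pv_equiv track=rewrite | github.com/little-isaac/scaler | advance/live/day_65/q2.py | solve
-- ===== SOURCE A (Python) =====
-- def solve(A):
--     n = len(A)
--     hashMap = {}
--     for i in range(n):
--         ele = str(A[i][0]) + "#" + str(A[i][1])
--         if ele in hashMap:
--             hashMap[ele] = hashMap[ele] + 1
--         else:
--             hashMap[ele] = 1
--     ans = len(hashMap)
--     return ans
-- ===== SOURCE B (Python) =====
-- def solve(A):
--     keys = sorted(str(p[0]) + "#" + str(p[1]) for p in A)
--     count = 0
--     prev = None
--     for k in keys:
--         if k != prev:
--             count += 1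
--         prev = k
--     return count
-- ===== Notes on version B (the rewrite author's own statement) =====
-- stated objective: alternative
-- what changed: Replaces A's hash-map of occurrence counts with a sort-then-scan: build the same string keys, sort them, and count an element whenever it differs from its predecessor.
import Mathlib
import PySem

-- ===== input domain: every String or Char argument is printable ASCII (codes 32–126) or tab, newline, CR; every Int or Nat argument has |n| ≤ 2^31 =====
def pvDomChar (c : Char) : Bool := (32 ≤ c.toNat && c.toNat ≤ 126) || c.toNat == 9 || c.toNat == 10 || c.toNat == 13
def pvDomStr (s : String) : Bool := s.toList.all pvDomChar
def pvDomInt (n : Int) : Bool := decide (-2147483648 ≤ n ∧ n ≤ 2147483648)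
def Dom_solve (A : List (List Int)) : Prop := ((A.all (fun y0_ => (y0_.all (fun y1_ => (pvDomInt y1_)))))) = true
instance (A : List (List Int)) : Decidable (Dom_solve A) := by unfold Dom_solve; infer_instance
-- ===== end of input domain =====

-- B replaces A's hash-map of occurrence counts by sort-then-scan over the same string keys (alternative decomposition, same result).


-- ===== PORT A =====
-- ele = str(A[i][0]) + "#" + str(A[i][1])  (Pre_ guarantees both indices exist, so getD 0 is never used)
def solveKeyA (row : List Int) : String :=
  PySem.Int.toStr ((PySem.List.pyGet? row 0).getD 0) ++ "#" ++
    PySem.Int.toStr ((PySem.List.pyGet? row 1).getD 0)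

def solve (A : List (List Int)) : Int :=
  let hashMap : PySem.Dict String Int :=
    A.foldl (fun h row =>
      let ele := solveKeyA row
      if h.contains ele then h.insert ele (h.getD ele 0 + 1) else h.insert ele 1)
      PySem.Dict.empty
  (hashMap.size : Int)

-- ===== PORT B =====
def solveKeyB (row : List Int) : String :=
  PySem.Int.toStr ((PySem.List.pyGet? row 0).getD 0) ++ "#" ++
    PySem.Int.toStr ((PySem.List.pyGet? row 1).getD 0)

-- loop body: 'if k != prev: count += 1; prev = k'
def solveScanStep (st : Int × Option String) (k : String) : Int × Option String :=
  (if some k ≠ st.2 then st.1 + 1 else st.1, some k)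

def solve_alt (A : List (List Int)) : Int :=
  let keys := PySem.List.sorted (A.map solveKeyB) (fun x => x) false
  (keys.foldl solveScanStep (0, none)).1

-- ===== PRECONDITION & SPEC =====
-- Pre_ excludes exactly the inputs where A raises IndexError: a row with fewer than two entries.
def Pre_solve (A : List (List Int)) : Prop := ∀ row ∈ A, 2 ≤ row.length
instance (A : List (List Int)) : Decidable (Pre_solve A) := by unfold Pre_solve; infer_instance
def pvWitness_solve : List (List Int) := [[1, 2], [1, 2, 5], [3, 4]]

def Spec_solve (A : List (List Int)) (out : Int) : Prop := out = solve_alt A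
instance (A : List (List Int)) (out : Int) : Decidable (Spec_solve A out) := by unfold Spec_solve; infer_instance

-- ===== CLAIM (what is proved, stated in full; the proofs are below) =====
def Claim_equal_solve : Prop := ∀ (A : List (List Int)), Dom_solve A → Pre_solve A → Spec_solve A (solve A)

-- ===== LEMMAS AND PROOFS =====

theorem card_insert_sdiff {α : Type} [DecidableEq α] (a : α) (S : Finset α) :
    (insert a S).card = (S \ {a}).card + 1 := by
  have h1 : insert a (S \ {a}) = insert a S := by
    ext x; by_cases hx : x = a <;> simp [hx]
  have h2 : a ∉ S \ {a} := by simp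
  rw [← h1, Finset.card_insert_of_notMem h2]

theorem ofList_card {α : Type} [DecidableEq α] (l : List α) :
    (PySem.Set.ofList l : List α).length = l.toFinset.card := by
  have hnd : (PySem.Set.ofList l : List α).Nodup := PySem.Set.nodup_ofList l
  have hfs : (PySem.Set.ofList l : List α).toFinset = l.toFinset := by
    ext x; simp [List.mem_toFinset, PySem.Set.mem_ofList]
  rw [← List.toFinset_card_of_nodup hnd, hfs]

-- A's dict-size equals the number of distinct keys.
theorem solve_eq_card (A : List (List Int)) :
    solve A = ((A.map solveKeyA).toFinset.card : Int) := by
  unfold solve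
  dsimp only
  have hf : (fun (h : PySem.Dict String Int) row =>
      let ele := solveKeyA row
      if h.contains ele then h.insert ele (h.getD ele 0 + 1) else h.insert ele 1)
      = (fun (h : PySem.Dict String Int) row =>
          h.insert (solveKeyA row)
            (if h.contains (solveKeyA row) then h.getD (solveKeyA row) 0 + 1 else 1)) := by
    funext h row; dsimp only; split <;> rfl
  rw [hf]
  have hk : (A.foldl (fun (h : PySem.Dict String Int) row =>
        h.insert (solveKeyA row)
          (if h.contains (solveKeyA row) then h.getD (solveKeyA row) 0 + 1 else 1))
        PySem.Dict.empty).keys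
      = PySem.Set.update (PySem.Dict.empty : PySem.Dict String Int).keys (A.map solveKeyA) :=
    PySem.Dict.keys_foldl_insert_key ..
  have hsz : (A.foldl (fun (h : PySem.Dict String Int) row =>
        h.insert (solveKeyA row)
          (if h.contains (solveKeyA row) then h.getD (solveKeyA row) 0 + 1 else 1))
        PySem.Dict.empty).size
      = (A.foldl (fun (h : PySem.Dict String Int) row =>
        h.insert (solveKeyA row)
          (if h.contains (solveKeyA row) then h.getD (solveKeyA row) 0 + 1 else 1))
        PySem.Dict.empty).keys.length := by
    simp [PySem.Dict.size, PySem.Dict.keys]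
  rw [hsz, hk]
  have hupd : PySem.Set.update (PySem.Dict.empty : PySem.Dict String Int).keys (A.map solveKeyA)
      = PySem.Set.ofList (A.map solveKeyA) := rfl
  rw [hupd, ofList_card]

-- B's scan over a ≤-sorted list, running with prev = some a where a is ≤ every element:
-- the count grows by the number of distinct elements other than a.
theorem scan_sorted (t : List String) (a : String) (c : Int)
    (hp : t.Pairwise (· ≤ ·)) (ha : ∀ x ∈ t, a ≤ x) :
    (t.foldl solveScanStep (c, some a)).1 = c + ((t.toFinset \ {a}).card : Int) := by
  induction t generalizing a c with
  | nil => simp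
  | cons b u ih =>
    rw [List.pairwise_cons] at hp
    obtain ⟨hb, hu⟩ := hp
    have hab : a ≤ b := ha b (List.mem_cons_self ..)
    rw [List.foldl_cons]
    by_cases hba : b = a
    · subst hba
      rw [show solveScanStep (c, some b) b = (c, some b) from by simp [solveScanStep]]
      rw [ih b c hu hb, List.toFinset_cons,
        Finset.insert_sdiff_of_mem _ (Finset.mem_singleton_self b)]
    · rw [show solveScanStep (c, some a) b = (c + 1, some b) from by simp [solveScanStep, hba]]
      rw [ih b (c + 1) hu hb]
      have hnot : a ∉ (b :: u).toFinset := by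
        simp only [List.toFinset_cons, Finset.mem_insert, List.mem_toFinset]
        rintro (h | h)
        · exact hba h.symm
        · exact hba (le_antisymm hab (hb a h)).symm
      have e1 : (b :: u).toFinset \ {a} = insert b u.toFinset := by
        rw [List.toFinset_cons]
        apply Finset.sdiff_eq_self_of_disjoint
        rw [Finset.disjoint_singleton_right]
        rw [List.toFinset_cons] at hnot
        exact hnot
      rw [e1, card_insert_sdiff]
      push_cast; ring

theorem solve_alt_eq_card (A : List (List Int)) :
    solve_alt A = ((A.map solveKeyB).toFinset.card : Int) := by
  unfold solve_alt
  dsimp only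
  have hperm : (PySem.List.sorted (A.map solveKeyB) (fun x => x) false).Perm (A.map solveKeyB) :=
    PySem.List.sorted_perm ..
  have hfs : (PySem.List.sorted (A.map solveKeyB) (fun x => x) false).toFinset
      = (A.map solveKeyB).toFinset := by
    ext x; simp [List.mem_toFinset, hperm.mem_iff]
  have hpw : (PySem.List.sorted (A.map solveKeyB) (fun x => x) false).Pairwise (· ≤ ·) :=
    PySem.List.sorted_pairwise ..
  rw [← hfs]
  cases hs : PySem.List.sorted (A.map solveKeyB) (fun x => x) false with
  | nil => simp
  | cons a t =>
    rw [hs] at hpw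
    rw [List.pairwise_cons] at hpw
    obtain ⟨ha, hp⟩ := hpw
    rw [List.foldl_cons]
    rw [show solveScanStep (0, none) a = (1, some a) from by simp [solveScanStep]]
    rw [scan_sorted t a 1 hp ha, List.toFinset_cons, card_insert_sdiff]
    push_cast; ring

-- ===== VERDICT (by name: the statement is the Claim_ definition above) =====
theorem solve_spec : Claim_equal_solve := by
  intro A _ _
  unfold Spec_solve
  rw [solve_eq_card, solve_alt_eq_card]
  rfl
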